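-- pv_equiv track=rewrite | github.com/jkjale/codingbat-python | Logic-2/lucky_sum.py | lucky_sum
-- ===== SOURCE A (Python) =====
-- def lucky_sum(a, b, c):
--   ans = 0
--   arr = [a,b,c]
--   i = 0
--   while i < len(arr):
--     if arr[i] != 13:
--       ans += arr[i]
--     else:
--       break
--     i += 1
--   return ans
-- ===== SOURCE B (Python) =====
-- def lucky_sum(a, b, c):
--   vals = [a, b, c]
--   n = vals.index(13) if 13 in vals else 3
--   return sum(vals[:n])
-- ===== Notes on version B (the rewrite author's own statement) =====
-- stated objective: idiomatic
-- what changed: Replaced the manual accumulate-with-break while loop by a two-step find-the-first-13 (index/membership) then sum-the-prefix (slice + sum) formulation.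
import Mathlib
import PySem

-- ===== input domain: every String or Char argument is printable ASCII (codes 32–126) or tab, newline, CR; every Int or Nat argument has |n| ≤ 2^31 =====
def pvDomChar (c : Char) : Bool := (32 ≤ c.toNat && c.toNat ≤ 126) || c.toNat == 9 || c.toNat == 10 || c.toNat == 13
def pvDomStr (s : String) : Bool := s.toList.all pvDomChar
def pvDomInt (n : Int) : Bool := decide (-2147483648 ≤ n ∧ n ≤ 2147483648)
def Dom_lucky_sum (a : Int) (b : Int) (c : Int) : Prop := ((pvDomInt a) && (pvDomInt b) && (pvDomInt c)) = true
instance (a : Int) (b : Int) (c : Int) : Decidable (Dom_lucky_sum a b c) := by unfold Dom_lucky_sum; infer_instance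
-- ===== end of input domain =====

-- B: the manual accumulate-with-break loop is replaced by find-the-first-13 then sum-the-prefix (idiomatic decomposition; same cost).
-- ===== PORT A =====
-- while i < len(arr): if arr[i] != 13: ans += arr[i] else: break; i += 1
def luckySumLoop : List Int → Int → Int
  | [], ans => ans
  | x :: xs, ans => if x ≠ 13 then luckySumLoop xs (ans + x) else ans

def lucky_sum (a : Int) (b : Int) (c : Int) : Int :=
  luckySumLoop [a, b, c] 0

-- ===== PORT B =====
def lucky_sum_alt (a : Int) (b : Int) (c : Int) : Int :=
  let vals : List Int := [a, b, c]
  let n : Int := match PySem.List.index? vals 13 with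
    | some i => (i : Int)
    | none => 3
  (PySem.List.slice vals none (some n)).sum

-- ===== PRECONDITION & SPEC =====
def Spec_lucky_sum (a : Int) (b : Int) (c : Int) (out : Int) : Prop := out = lucky_sum_alt a b c
instance (a : Int) (b : Int) (c : Int) (out : Int) : Decidable (Spec_lucky_sum a b c out) := by unfold Spec_lucky_sum; infer_instance

-- ===== CLAIM (what is proved, stated in full; the proofs are below) =====
def Claim_equal_lucky_sum : Prop := ∀ (a : Int) (b : Int) (c : Int), Dom_lucky_sum a b c → Spec_lucky_sum a b c (lucky_sum a b c)

-- ===== LEMMAS AND PROOFS =====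

-- ===== VERDICT (by name: the statement is the Claim_ definition above) =====
theorem lucky_sum_spec : Claim_equal_lucky_sum := by
  intro a b c _
  unfold Spec_lucky_sum lucky_sum lucky_sum_alt
  by_cases ha : a = 13 <;> by_cases hb : b = 13 <;> by_cases hc : c = 13 <;>
    simp [luckySumLoop, PySem.List.index?, List.idxOf?, List.findIdx?, List.findIdx?.go,
          PySem.List.slice, PySem.List.clampIdx, ha, hb, hc] <;> ring
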